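-- pv_equiv track=rewrite | github.com/ummjevel/Algorithm_CPlusPlus | Python/programmers0-1/135808.py | solution
-- ===== SOURCE A (Python) =====
-- def solution(k, m, score):
--     answer = 0
--     results = [0]
--     score = sorted(score, reverse=True)
--     for i in range(0, len(score) - m + 1, m):
--         results.append(min(score[i:i+m]))
--     answer = sum(list(map(lambda x:x*m, results)))
--     return answer
-- ===== SOURCE B (Python) =====
-- def solution(k, m, score):
--     items = list(score)
--     total = 0
--     while m > 0 and len(items) >= m:
--         low = 0
--         for _ in range(m):
--             low = max(items)
--             items.remove(low)
--         total += m * low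
--     return total
-- ===== Notes on version B (the rewrite author's own statement) =====
-- stated objective: alternative
-- what changed: B never sorts: it repeatedly selects the m largest remaining elements directly from the unsorted list (max + remove, m times per round), adding m times the last one selected, instead of A's sort-descending pass that slices each m-block and scans it with min.
import Mathlib
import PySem

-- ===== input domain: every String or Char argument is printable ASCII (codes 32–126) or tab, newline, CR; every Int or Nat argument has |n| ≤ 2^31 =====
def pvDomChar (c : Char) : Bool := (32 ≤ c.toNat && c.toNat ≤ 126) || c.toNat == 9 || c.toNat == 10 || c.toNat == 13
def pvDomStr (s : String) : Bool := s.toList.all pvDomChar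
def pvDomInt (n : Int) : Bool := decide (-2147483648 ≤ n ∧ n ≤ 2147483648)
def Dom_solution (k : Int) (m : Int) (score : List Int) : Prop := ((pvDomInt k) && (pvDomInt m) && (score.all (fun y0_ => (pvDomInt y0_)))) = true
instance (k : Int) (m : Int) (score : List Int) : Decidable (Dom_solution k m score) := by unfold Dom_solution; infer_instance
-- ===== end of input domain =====

-- B drops A's sort entirely: it repeatedly extracts the m largest remaining elements by
-- selection (max + remove), adding m times the last one extracted — a different algorithm
-- (repeated selection on the raw list vs sort-then-block-scan); alternative, not faster.

-- ===== PORT A =====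
-- min(<slice>) raises on an empty slice in Python; inside Pre_ (m ≠ 0) every slice the
-- loop reaches has exactly m ≥ 1 elements, so the .getD 0 default is never used.
def solution (k : Int) (m : Int) (score : List Int) : Int :=
  let s := PySem.List.sorted score (fun x => x) true
  let results : List Int :=
    (PySem.List.pyRange 0 ((s.length : Int) - m + 1) m).foldl
      (fun r i =>
        r ++ [(PySem.List.min? (PySem.List.slice s (some i) (some (i + m))) (fun x => x)).getD 0])
      [0]
  (results.map (fun x => x * m)).sum

-- ===== PORT B =====
-- the inner 'for _ in range(m): low = max(items); items.remove(low)' of Source B;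
-- max() raises on an empty list: under the loop guard (m ≤ len(items)) it never is,
-- so the .getD defaults are never used.
def innerB : Nat → List Int → Int → List Int × Int
  | 0, items, low => (items, low)
  | n + 1, items, _ =>
      let x := (PySem.List.max? items (fun y => y)).getD 0
      innerB n ((PySem.List.remove? items x).getD items) x

-- termination of the while loop: each pass removes m.toNat ≥ 1 elements
theorem innerB_length : ∀ (n : Nat) (items : List Int) (low : Int), n ≤ items.length →
    (innerB n items low).1.length = items.length - n := by
  intro n
  induction n with
  | zero => intro items low _; simp [innerB]
  | succ n ih =>
    intro items low h
    cases hmax : PySem.List.max? items (fun y => y) with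
    | none =>
      rw [PySem.List.max?_eq_none_iff] at hmax
      subst hmax; simp at h
    | some v =>
      have hv : v ∈ items := PySem.List.max?_mem hmax
      have hrm := PySem.List.remove?_eq_some_erase items v hv
      have hlen : (items.erase v).length = items.length - 1 := List.length_erase_of_mem hv
      simp only [innerB, hmax, hrm, Option.getD_some]
      rw [ih _ v (by omega), hlen]
      omega

-- the while loop of Source B
def loopB (m : Int) (items : List Int) (total : Int) : Int :=
  if h : 0 < m ∧ m ≤ (items.length : Int) then
    loopB m (innerB m.toNat items 0).1 (total + m * (innerB m.toNat items 0).2)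
  else total
termination_by items.length
decreasing_by
  rw [innerB_length m.toNat items 0 (by omega)]
  omega

def solution_alt (k : Int) (m : Int) (score : List Int) : Int :=
  loopB m score 0

-- ===== PRECONDITION & SPEC =====
-- m = 0 makes range()'s step zero: A raises ValueError there; everything else is admitted.
def Pre_solution (k : Int) (m : Int) (score : List Int) : Prop := m ≠ 0
instance (k : Int) (m : Int) (score : List Int) : Decidable (Pre_solution k m score) := by unfold Pre_solution; infer_instance
def pvWitness_solution : Int × Int × List Int := (0, 2, [4, 1, 2, 5, 2])

def Spec_solution (k : Int) (m : Int) (score : List Int) (out : Int) : Prop := out = solution_alt k m score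
instance (k : Int) (m : Int) (score : List Int) (out : Int) : Decidable (Spec_solution k m score out) := by unfold Spec_solution; infer_instance

-- ===== CLAIM (what is proved, stated in full; the proofs are below) =====
def Claim_equal_solution : Prop := ∀ (k : Int) (m : Int) (score : List Int), Dom_solution k m score → Pre_solution k m score → Spec_solution k m score (solution k m score)

-- ===== LEMMAS AND PROOFS =====

-- ---- A-side: the block-min loop equals a strided order-statistic sum ----

-- folding min over a descending list yields its last element
theorem foldl_min_desc (x : Int) (t : List Int)
    (h : (x :: t).Pairwise (fun a b => b ≤ a)) :
    List.foldl min x t = (x :: t).getLast (List.cons_ne_nil x t) := by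
  induction t generalizing x with
  | nil => simp
  | cons y t ih =>
    have hxy : y ≤ x := (List.pairwise_cons.mp h).1 y (by simp)
    have h' : (y :: t).Pairwise (fun a b => b ≤ a) := (List.pairwise_cons.mp h).2
    simp only [List.foldl_cons, min_eq_right hxy]
    rw [ih y h']
    simp [List.getLast_cons]

-- the Python min of the block s[j : j+mm] of a descending list is s[j+mm-1]
theorem min_desc_block (s : List Int) (hs : s.Pairwise (fun a b => b ≤ a))
    (j mm : Nat) (hmm : 0 < mm) (hle : j + mm ≤ s.length) :
    (PySem.List.min? ((s.drop j).take mm) (fun x => x)).getD 0 = s.getD (j + mm - 1) 0 := by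
  have hlen : ((s.drop j).take mm).length = mm := by
    simp [List.length_take, List.length_drop]; omega
  have hsub : ((s.drop j).take mm).Sublist s :=
    (List.take_sublist mm (s.drop j)).trans (List.drop_sublist j s)
  have hp : ((s.drop j).take mm).Pairwise (fun a b => b ≤ a) := hs.sublist hsub
  have hjd : j + mm - 1 < s.length := by omega
  cases hl : (s.drop j).take mm with
  | nil => rw [hl] at hlen; simp at hlen; omega
  | cons x t =>
    rw [hl] at hp hlen
    rw [PySem.List.min?_id_cons, Option.getD_some, foldl_min_desc x t hp,
        List.getLast_eq_getElem, List.getD_eq_getElem s 0 hjd]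
    have h1 : mm - 1 < (x :: t).length := by omega
    have key : (x :: t)[mm - 1]'h1 = s[j + mm - 1]'hjd := by
      have key0 : (List.take mm (List.drop j s)).getD (mm - 1) 0 = s[j + mm - 1]'hjd := by
        rw [List.getD_eq_getElem _ 0 (by rw [hl]; exact h1), List.getElem_take, List.getElem_drop]
        congr 1
        omega
      rw [hl, List.getD_eq_getElem _ 0 h1] at key0
      exact key0
    rw [← key]
    simp [hlen]

theorem blocksum_eq (s : List Int) (hs : s.Pairwise (fun a b => b ≤ a)) (m : Int) (hpos : 0 < m)
    (c : Nat) (hc : (c : Int) * m ≤ s.length) :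
    (List.map (fun kk : Nat =>
        (PySem.List.min? (PySem.List.slice s (some (m * kk)) (some (m * kk + m))) (fun x => x)).getD 0 * m)
      (List.range c)).sum
    = m * (List.map (fun kk : Nat => PySem.List.pyGetD s (m - 1 + m * kk) 0) (List.range c)).sum := by
  rw [← List.sum_map_mul_left]
  apply congrArg List.sum
  apply List.map_congr_left
  intro kk hkk
  have hkk' : (kk : Int) < c := by exact_mod_cast List.mem_range.mp hkk
  have hub : m * kk + m ≤ (s.length : Int) := by nlinarith
  have h0 : (0 : Int) ≤ m * kk := by positivity
  rw [PySem.List.slice_toNat s h0 (by omega)]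
  have hj : (m * (kk : Int)).toNat + ((m * kk + m).toNat - (m * kk).toNat) ≤ s.length := by omega
  have hmmpos : 0 < (m * (kk:Int) + m).toNat - (m * (kk:Int)).toNat := by omega
  rw [min_desc_block s hs _ _ hmmpos hj]
  have hBlt : ((m - 1 + m * (kk:Int))).toNat < s.length := by omega
  rw [PySem.List.pyGetD_eq_getElem s 0 (by omega) (by omega),
      ← List.getD_eq_getElem s 0 hBlt,
      show (m * (kk:Int)).toNat + ((m * kk + m).toNat - (m * kk).toNat) - 1
         = (m - 1 + m * (kk:Int)).toNat from by omega,
      mul_comm]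

-- ---- B-side: selection loop facts ----

-- max(l) with no key is the same value on any permutation of l
theorem max_id_perm (l l' : List Int) (h : l.Perm l') :
    PySem.List.max? l (fun y => y) = PySem.List.max? l' (fun y => y) := by
  cases hl : PySem.List.max? l (fun y => y) with
  | none =>
    rw [PySem.List.max?_eq_none_iff] at hl
    subst hl
    rw [List.nil_perm] at h
    subst h; rfl
  | some v =>
    cases hl' : PySem.List.max? l' (fun y => y) with
    | none =>
      rw [PySem.List.max?_eq_none_iff] at hl'
      subst hl'
      rw [List.perm_nil] at h
      subst h
      have hnone : PySem.List.max? ([] : List Int) (fun y => y) = none :=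
        (PySem.List.max?_eq_none_iff _ _).mpr rfl
      rw [hnone] at hl
      cases hl
    | some w =>
      have hv : v ∈ l := PySem.List.max?_mem hl
      have hw : w ∈ l' := PySem.List.max?_mem hl'
      have h1 : v ≤ w := PySem.List.max?_isMax hl' v (h.mem_iff.mp hv)
      have h2 : w ≤ v := PySem.List.max?_isMax hl w (h.mem_iff.mpr hw)
      rw [le_antisymm h1 h2]

theorem innerB_perm : ∀ (n : Nat) (l l' : List Int) (low : Int), l.Perm l' →
    (innerB n l low).1.Perm (innerB n l' low).1 ∧ (innerB n l low).2 = (innerB n l' low).2 := by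
  intro n
  induction n with
  | zero => intro l l' low h; exact ⟨h, rfl⟩
  | succ n ih =>
    intro l l' low h
    by_cases hl : l = []
    · have hl' : l' = [] := by rw [hl] at h; exact List.nil_perm.mp h
      subst hl; subst hl'
      exact ⟨List.Perm.refl _, rfl⟩
    · cases hmax : PySem.List.max? l (fun y => y) with
      | none => rw [PySem.List.max?_eq_none_iff] at hmax; exact absurd hmax hl
      | some v =>
        have hmax' : PySem.List.max? l' (fun y => y) = some v :=
          (max_id_perm l l' h).symm.trans hmax
        have hv : v ∈ l := PySem.List.max?_mem hmax
        have hv' : v ∈ l' := h.mem_iff.mp hv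
        simp only [innerB, hmax, hmax', Option.getD_some,
          PySem.List.remove?_eq_some_erase l v hv, PySem.List.remove?_eq_some_erase l' v hv']
        exact ih (l.erase v) (l'.erase v) v (h.erase v)

theorem loopB_perm (m : Int) : ∀ (N : Nat) (l l' : List Int) (t : Int), l.length ≤ N →
    l.Perm l' → loopB m l t = loopB m l' t := by
  intro N
  induction N with
  | zero =>
    intro l l' t hN h
    have hl : l = [] := List.length_eq_zero_iff.mp (Nat.le_zero.mp hN)
    subst hl
    have hl' : l' = [] := List.nil_perm.mp h
    subst hl'
    rfl
  | succ N ih =>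
    intro l l' t hN h
    have hlen : l'.length = l.length := h.length_eq.symm
    conv_lhs => rw [loopB]
    conv_rhs => rw [loopB]
    rw [hlen]
    split_ifs with hg
    · obtain ⟨hperm, heq⟩ := innerB_perm m.toNat l l' 0 h
      rw [heq]
      refine ih _ _ _ ?_ hperm
      rw [innerB_length m.toNat l 0 (by omega)]
      omega
    · rfl

-- on a descending list the selection loop just peels off a prefix:
-- it returns the list minus its first n elements, and the n-th largest as 'low'
theorem foldl_max_of_le (h0 : Int) (t : List Int) (h : ∀ y ∈ t, y ≤ h0) :
    t.foldl max h0 = h0 := by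
  induction t with
  | nil => rfl
  | cons y t ih =>
    have hy : y ≤ h0 := h y (by simp)
    simp only [List.foldl_cons, max_eq_left hy]
    exact ih (fun z hz => h z (by simp [hz]))

theorem innerB_sorted : ∀ (n : Nat) (s : List Int) (low : Int),
    s.Pairwise (fun a b => b ≤ a) → n ≤ s.length →
    innerB n s low = (s.drop n, if n = 0 then low else s.getD (n - 1) 0) := by
  intro n
  induction n with
  | zero => intro s low _ _; simp [innerB]
  | succ n ih =>
    intro s low hp hn
    cases s with
    | nil => simp at hn
    | cons h0 t =>
      have hmax : PySem.List.max? (h0 :: t) (fun y => y) = some h0 := by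
        rw [PySem.List.max?_id_cons,
            foldl_max_of_le h0 t (List.pairwise_cons.mp hp).1]
      simp only [innerB, hmax, Option.getD_some, PySem.List.remove?_cons_self]
      rw [ih t h0 (List.pairwise_cons.mp hp).2 (by simpa using hn)]
      cases n with
      | zero => simp
      | succ n => simp [List.getD]

theorem loopB_sorted (m : Int) (hpos : 0 < m) : ∀ (N : Nat) (s : List Int) (t : Int),
    s.length ≤ N → s.Pairwise (fun a b => b ≤ a) →
    loopB m s t =
      t + m * ((List.range (((s.length : Int)) / m).toNat).map
        (fun kk : Nat => PySem.List.pyGetD s (m - 1 + m * (kk : Int)) 0)).sum := by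
  intro N
  induction N with
  | zero =>
    intro s t hN _
    have hs : s = [] := List.length_eq_zero_iff.mp (Nat.le_zero.mp hN)
    subst hs
    rw [loopB]
    simp
  | succ N ih =>
    intro s t hN hp
    have hmE : ((m.toNat : Int)) = m := Int.toNat_of_nonneg (le_of_lt hpos)
    rw [loopB]
    by_cases hle : m ≤ (s.length : Int)
    · rw [dif_pos ⟨hpos, hle⟩,
          innerB_sorted m.toNat s 0 hp (by omega)]
      have hm0 : m.toNat ≠ 0 := by omega
      simp only [hm0, if_false]
      have hdp : (s.drop m.toNat).Pairwise (fun a b => b ≤ a) := hp.sublist (List.drop_sublist _ _)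
      rw [ih (s.drop m.toNat) _ (by simp; omega) hdp]
      -- counts: len/m = (len - m)/m + 1
      have hdl : (((s.drop m.toNat).length : Int)) = (s.length : Int) - m := by
        simp [List.length_drop]; omega
      have hdiv : ((s.length : Int)) / m = ((s.length : Int) - m) / m + 1 := by
        conv_lhs => rw [show (s.length : Int) = ((s.length : Int) - m) + 1 * m from by ring]
        rw [Int.add_mul_ediv_right _ _ (by omega : m ≠ 0)]
      have hq0 : (0 : Int) ≤ ((s.length : Int) - m) / m :=
        Int.ediv_nonneg (by omega) (by omega)
      have hcnt : (((s.length : Int)) / m).toNat = (((s.length : Int) - m) / m).toNat + 1 := by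
        omega
      set c' : Nat := (((s.length : Int) - m) / m).toNat with hc'
      have hmc' : (c' : Int) * m ≤ (s.length : Int) - m := by
        have h1 : ((s.length : Int) - m) / m * m ≤ (s.length : Int) - m :=
          Int.ediv_mul_le _ (by omega)
        have h2 : (c' : Int) = ((s.length : Int) - m) / m := by rw [hc']; omega
        rw [h2]; exact h1
      rw [hdl, hcnt, List.range_succ_eq_map]
      simp only [List.map_cons, List.map_map, List.sum_cons, Function.comp_def]
      -- the head term
      have hhead : PySem.List.pyGetD s (m - 1 + m * ((0 : Nat) : Int)) 0 = s.getD (m.toNat - 1) 0 := by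
        have hlt : m - 1 + m * ((0 : Nat) : Int) < (s.length : Int) := by
          simp; omega
        rw [PySem.List.pyGetD_eq_getElem s 0 (by simp; omega) hlt,
            List.getD_eq_getElem s 0 (by omega)]
        congr 1
        simp
      -- the shifted terms
      have hshift : ∀ kk ∈ List.range c',
          PySem.List.pyGetD (s.drop m.toNat) (m - 1 + m * (kk : Int)) 0
            = PySem.List.pyGetD s (m - 1 + m * (((kk : Nat) + 1 : Nat) : Int)) 0 := by
        intro kk hkk
        have hkklt : (kk : Int) < c' := by exact_mod_cast List.mem_range.mp hkk
        have hq : (0 : Int) ≤ m * kk := by positivity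
        have hub : m * (kk : Int) + m ≤ (c' : Int) * m := by nlinarith
        have hub2 : m - 1 + m * (kk : Int) < (s.length : Int) - m := by omega
        have hlt1 : m - 1 + m * (kk : Int) < ((s.drop m.toNat).length : Int) := by
          rw [hdl]; omega
        rw [PySem.List.pyGetD_eq_getElem (s.drop m.toNat) 0 (by omega) hlt1,
            List.getElem_drop]
        have hlt2 : m - 1 + m * (((kk : Nat) + 1 : Nat) : Int) < (s.length : Int) := by
          push_cast
          have : m * ((kk : Int) + 1) = m * kk + m := by ring
          rw [this]; omega
        rw [PySem.List.pyGetD_eq_getElem s 0 (by push_cast; nlinarith [hq]) hlt2]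
        congr 1
        have hmm : m * (((kk : Nat) + 1 : Nat) : Int) = m * kk + m := by push_cast; ring
        omega
      rw [List.map_congr_left hshift, hhead]
      push_cast
      ring
    · rw [dif_neg (by tauto)]
      have hz : ((s.length : Int)) / m = 0 := by
        apply Int.ediv_eq_zero_of_lt (by omega) (by omega)
      rw [hz]
      simp

-- ===== VERDICT (by name: the statement is the Claim_ definition above) =====
theorem solution_spec : Claim_equal_solution := by
  unfold Claim_equal_solution
  intro k m score _ hm
  unfold Pre_solution at hm
  unfold Spec_solution
  simp only [solution, solution_alt]
  have hs : (PySem.List.sorted score (fun x => x) true).Pairwise (fun a b => b ≤ a) :=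
    PySem.List.sorted_pairwise_rev score (fun x => x)
  set s := PySem.List.sorted score (fun x => x) true with hsdef
  set n : Nat := s.length with hn
  rcases lt_or_gt_of_ne hm with hneg | hpos
  · -- m < 0 : A's range is empty and B's loop guard is false; both return 0
    have h1 : ¬ (0:Int) < m := by omega
    have h2 : ¬ ((n:Int) - m + 1 < 0) := by omega
    have hA : PySem.List.pyRange 0 ((n:Int) - m + 1) m = [] := by
      simp [PySem.List.pyRange, hm, h1, h2]
    rw [hA, loopB, dif_neg (by omega)]
    simp
  · -- m > 0
    rw [loopB_perm m (score.length) score s 0 (le_refl _)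
          (PySem.List.sorted_perm score (fun x => x) true).symm,
        loopB_sorted m hpos n s 0 (le_refl _) hs]
    rw [PySem.List.pyRange_of_pos 0 ((n:Int) - m + 1) hpos]
    by_cases hg : (0:Int) < (n:Int) - m + 1
    · rw [if_pos (by omega)]
      have e1 : ((n:Int) - m + 1 - 0 + m - 1) = (n:Int) := by ring
      rw [e1]
      set c : Nat := (((n:Int)) / m).toNat with hc
      have hcle : (c : Int) * m ≤ (n:Int) := by
        have h := Int.ediv_mul_le (n:Int) (by omega : m ≠ 0)
        have hcv : (c : Int) = (n:Int) / m := by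
          rw [hc]; exact Int.toNat_of_nonneg (Int.ediv_nonneg (by omega) (by omega))
        calc (c:Int) * m = (n:Int) / m * m := by rw [hcv]
          _ ≤ (n:Int) := h
      rw [List.foldl_map, PySem.List.foldl_append_singleton_eq_map]
      simp only [List.map_map, List.map_append, List.map_cons, List.map_nil, List.sum_append,
        List.sum_cons, List.sum_nil, zero_mul, zero_add, Function.comp_def, zero_add]
      rw [blocksum_eq s hs m hpos c hcle]
    · rw [if_neg (by omega)]
      have hz : ((n:Int)) / m = 0 := Int.ediv_eq_zero_of_lt (by omega) (by omega)
      rw [hz]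
      simp
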